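-- pv_equiv track=rewrite | github.com/LeonidKanin/Tests_Pydantic_28 | helpers/function.py | prepare_data_fields
-- ===== SOURCE A (Python) =====
-- def prepare_data_fields(booking):
--     # Создание массива для параметризации данных тела запроса
--     data = [booking]
--     for i in range(0, len(booking)):
--         change = booking.copy()
--         for j in range(0, i + 1):
--             change.popitem()
--         data.append(change)
--     data.reverse()
--     return data
-- ===== SOURCE B (Python) =====
-- def prepare_data_fields(booking):
--     # One forward pass: grow a prefix dict and snapshot it after each item.
--     data = [{}]
--     cur = {}
--     for key, value in booking.items():
--         cur[key] = value
--         data.append(dict(cur))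
--     return data
-- ===== Notes on version B (the rewrite author's own statement) =====
-- stated objective: simpler
-- what changed: B builds the prefix snapshots in one forward pass over booking.items() with a growing dict (O(n) dict operations, each snapshot a single copy), instead of A's nested popitem loops over fresh full copies followed by a reverse.
import Mathlib
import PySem

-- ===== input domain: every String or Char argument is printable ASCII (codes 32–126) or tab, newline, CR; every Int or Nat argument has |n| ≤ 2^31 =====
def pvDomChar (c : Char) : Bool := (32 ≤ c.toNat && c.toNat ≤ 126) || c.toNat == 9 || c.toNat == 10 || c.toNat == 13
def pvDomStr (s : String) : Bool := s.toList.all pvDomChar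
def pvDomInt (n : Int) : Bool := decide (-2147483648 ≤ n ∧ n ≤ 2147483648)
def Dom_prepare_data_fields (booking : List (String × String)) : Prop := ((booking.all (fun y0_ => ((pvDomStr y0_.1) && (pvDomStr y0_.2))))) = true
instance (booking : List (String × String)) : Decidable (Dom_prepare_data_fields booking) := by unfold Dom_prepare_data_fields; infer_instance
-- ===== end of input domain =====

-- B builds the prefix snapshots in one forward pass with a growing dict, instead of
-- A's nested popitem loops over fresh copies followed by a reverse; same return value.

-- ===== PORT A =====
-- booking is a Python dict, represented by its item list in insertion order.
-- dict.copy keeps the item list; popitem removes the LAST item, so each popitem is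
-- List.dropLast on the item list (exact: the inner loop pops i+1 ≤ len items, never
-- from an empty dict, so popitem never raises).
def prepare_data_fields (booking : List (String × String)) : List (List (String × String)) :=
  let data :=
    (PySem.List.pyRange 0 (PySem.List.len booking) 1).foldl
      (fun data i =>
        let change :=
          (PySem.List.pyRange 0 (i + 1) 1).foldl (fun change _ => change.dropLast) booking
        data ++ [change])
      [booking]
  data.reverse

-- ===== PORT B =====
-- cur is a growing Python dict (PySem.Dict: cur[key] = value is Dict.insert);
-- dict(cur) snapshots its item list.
def prepare_data_fields_alt (booking : List (String × String)) : List (List (String × String)) :=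
  let st :=
    booking.foldl
      (fun (st : List (List (String × String)) × PySem.Dict String String) kv =>
        let cur := st.2.insert kv.1 kv.2
        (st.1 ++ [cur.items], cur))
      ([(PySem.Dict.empty : PySem.Dict String String).items], PySem.Dict.empty)
  st.1

-- ===== PRECONDITION & SPEC =====
-- Pre_ excludes item lists with duplicate keys: the Python parameter is a dict, whose
-- item list never repeats a key, so only key-Nodup lists represent an actual input.
def Pre_prepare_data_fields (booking : List (String × String)) : Prop :=
  (booking.map Prod.fst).Nodup
instance (booking : List (String × String)) : Decidable (Pre_prepare_data_fields booking) := by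
  unfold Pre_prepare_data_fields; infer_instance

def pvWitness_prepare_data_fields : (List (String × String)) := [("a", "1"), ("b", "2")]

def Spec_prepare_data_fields (booking : List (String × String)) (out : List (List (String × String))) : Prop := out = prepare_data_fields_alt booking
instance (booking : List (String × String)) (out : List (List (String × String))) : Decidable (Spec_prepare_data_fields booking out) := by unfold Spec_prepare_data_fields; infer_instance

-- ===== CLAIM (what is proved, stated in full; the proofs are below) =====
def Claim_equal_prepare_data_fields : Prop := ∀ (booking : List (String × String)), Dom_prepare_data_fields booking → Pre_prepare_data_fields booking → Spec_prepare_data_fields booking (prepare_data_fields booking)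

-- ===== LEMMAS AND PROOFS =====

-- iterated dropLast is a take
theorem dropLast_iterate {α : Type} (k : Nat) (xs : List α) :
    List.dropLast^[k] xs = xs.take (xs.length - k) := by
  induction k generalizing xs with
  | zero => simp
  | succ k ih =>
      rw [Function.iterate_succ_apply, ih, List.length_dropLast, List.dropLast_eq_take,
        List.take_take]
      congr 1
      omega

-- reversing a map over range with mirrored index
theorem reverse_map_range_mirror {α : Type} (f : Nat → α) (n : Nat) :
    ((List.range n).map (fun k => f (n - (k + 1)))).reverse = (List.range n).map f := by
  induction n generalizing f with
  | zero => simp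
  | succ n ih =>
      rw [List.range_succ_eq_map, List.map_cons, List.map_map, List.reverse_cons]
      have h1 : ((List.range n).map ((fun k => f (n + 1 - (k + 1))) ∘ Nat.succ)) =
          (List.range n).map (fun k => f (n - (k + 1))) := by
        apply List.map_congr_left
        intro k _
        simp only [Function.comp]
        congr 1
        omega
      have h2 : List.map f (0 :: List.map Nat.succ (List.range n)) =
          List.map f (List.range (n + 1)) := by rw [List.range_succ_eq_map]
      rw [h1, ih, h2, List.range_succ, List.map_append]
      simp

-- A computes the list of all prefixes of booking (take 0, take 1, …, take n)
theorem portA_eq_prefixes (booking : List (String × String)) :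
    prepare_data_fields booking =
      (List.range (booking.length + 1)).map (fun k => booking.take k) := by
  have hinner : ∀ k : Nat,
      (PySem.List.pyRange 0 ((k : Int) + 1) 1).foldl
        (fun change _ => change.dropLast) booking
        = booking.take (booking.length - (k + 1)) := by
    intro k
    rw [List.foldl_const]
    have hl : (PySem.List.pyRange 0 ((k : Int) + 1) 1).length = k + 1 := by
      rw [PySem.List.length_pyRange_one]; omega
    rw [hl, dropLast_iterate]
  unfold prepare_data_fields
  simp only [PySem.List.len_eq, PySem.List.pyRange_zero_nat, List.foldl_map,
    PySem.List.foldl_append_singleton_eq_map]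
  have hmap : (List.range booking.length).map
        (fun x : Nat => (PySem.List.pyRange 0 ((x : Int) + 1) 1).foldl
          (fun change _ => change.dropLast) booking)
      = (List.range booking.length).map
        (fun k => booking.take (booking.length - (k + 1))) := by
    apply List.map_congr_left
    intro k _
    exact hinner k
  have h3 := reverse_map_range_mirror (fun k => booking.take k) booking.length
  simp only [] at h3
  rw [hmap, List.singleton_append, List.reverse_cons, h3,
    List.range_succ, List.map_append]
  simp

-- B's loop invariant: with fresh, pairwise-distinct keys, each snapshot extends d.items
theorem portB_loop {xs : List (String × String)}
    (acc : List (List (String × String))) (d : PySem.Dict String String)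
    (hfresh : ∀ k ∈ xs.map Prod.fst, d.contains k = false)
    (hnd : (xs.map Prod.fst).Nodup) :
    (xs.foldl
      (fun (st : List (List (String × String)) × PySem.Dict String String) kv =>
        let cur := st.2.insert kv.1 kv.2
        (st.1 ++ [cur.items], cur))
      (acc, d)).1
    = acc ++ (List.range xs.length).map (fun k => d.items ++ xs.take (k + 1)) := by
  induction xs generalizing acc d with
  | nil => simp
  | cons p xs ih =>
      obtain ⟨a, b⟩ := p
      simp only [List.foldl_cons]
      have hna : d.contains a = false := hfresh a (by simp)
      have hitems : (d.insert a b).items = d.items ++ [(a, b)] :=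
        PySem.Dict.items_insert_of_not_contains _ _ hna
      have hfresh' : ∀ k ∈ xs.map Prod.fst, (d.insert a b).contains k = false := by
        intro k hk
        rw [PySem.Dict.contains_insert]
        have hka : k ≠ a := by
          simp only [List.map_cons, List.nodup_cons] at hnd
          intro h; exact hnd.1 (h ▸ hk)
        simp [hka, hfresh k (by simp [hk])]
      have hnd' : (xs.map Prod.fst).Nodup := by
        simp only [List.map_cons, List.nodup_cons] at hnd; exact hnd.2
      rw [ih (acc ++ [(d.insert a b).items]) (d.insert a b) hfresh' hnd']
      rw [hitems, List.append_assoc]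
      congr 1
      rw [List.length_cons, List.range_succ_eq_map]
      simp only [List.map_cons, List.map_map, List.take_zero, List.take_succ_cons,
        List.singleton_append]
      congr 1
      apply List.map_congr_left
      intro k _
      simp [Function.comp, List.append_assoc]

-- B also computes the list of all prefixes, given Nodup keys
theorem portB_eq_prefixes (booking : List (String × String))
    (hnd : (booking.map Prod.fst).Nodup) :
    prepare_data_fields_alt booking =
      (List.range (booking.length + 1)).map (fun k => booking.take k) := by
  have hempty : (PySem.Dict.empty : PySem.Dict String String).items = [] := rfl
  unfold prepare_data_fields_alt
  rw [portB_loop _ PySem.Dict.empty (by simp [PySem.Dict.contains_empty]) hnd]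
  rw [hempty, List.range_succ_eq_map]
  simp [List.map_map, Function.comp]

-- ===== VERDICT (by name: the statement is the Claim_ definition above) =====
theorem prepare_data_fields_spec : Claim_equal_prepare_data_fields := by
  intro booking _ hpre
  unfold Spec_prepare_data_fields
  rw [portA_eq_prefixes, portB_eq_prefixes booking hpre]
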